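-- pv_equiv track=rewrite | github.com/jlillywh/GSswmm | generate_mapping_simple.py | parse_input_spec
-- ===== SOURCE A (Python) =====
-- def parse_input_spec(spec, sections):
--     """Parse input specification - just a name, auto-detect type."""
--     name = spec.strip()
--
--     # Check what type of element this is
--     for line in sections.get('RAINGAGES', []):
--         if len(line) >= 1 and line[0] == name:
--             return {'name': name, 'object_type': 'GAGE', 'property': 'RAINFALL'}
--
--     for line in sections.get('PUMPS', []):
--         if len(line) >= 1 and line[0] == name:
--             return {'name': name, 'object_type': 'PUMP', 'property': 'SETTING'}
--
--     for line in sections.get('ORIFICES', []):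
--         if len(line) >= 1 and line[0] == name:
--             return {'name': name, 'object_type': 'ORIFICE', 'property': 'SETTING'}
--
--     for line in sections.get('WEIRS', []):
--         if len(line) >= 1 and line[0] == name:
--             return {'name': name, 'object_type': 'WEIR', 'property': 'SETTING'}
--
--     for line in sections.get('JUNCTIONS', []):
--         if len(line) >= 1 and line[0] == name:
--             return {'name': name, 'object_type': 'NODE', 'property': 'LATFLOW'}
--
--     for line in sections.get('STORAGE', []):
--         if len(line) >= 1 and line[0] == name:
--             return {'name': name, 'object_type': 'NODE', 'property': 'LATFLOW'}
--
--     raise ValueError(f"Input element '{name}' not found in model")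
-- ===== SOURCE B (Python) =====
-- # Single index build (reverse priority order) + one lookup, instead of six sequential scans.
-- _META = [
--     ('STORAGE', 'NODE', 'LATFLOW'),
--     ('JUNCTIONS', 'NODE', 'LATFLOW'),
--     ('WEIRS', 'WEIR', 'SETTING'),
--     ('ORIFICES', 'ORIFICE', 'SETTING'),
--     ('PUMPS', 'PUMP', 'SETTING'),
--     ('RAINGAGES', 'GAGE', 'RAINFALL'),
-- ]
--
-- def parse_input_spec(spec, sections):
--     """Parse input specification - just a name, auto-detect type."""
--     name = spec.strip()
--     index = {}
--     # Lower-priority sections first: later (higher-priority) inserts overwrite.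
--     for sec, otype, prop in _META:
--         for line in sections.get(sec, []):
--             if len(line) >= 1:
--                 index[line[0]] = (otype, prop)
--     if name in index:
--         otype, prop = index[name]
--         return {'name': name, 'object_type': otype, 'property': prop}
--     raise ValueError(f"Input element '{name}' not found in model")
-- ===== Notes on version B (the rewrite author's own statement) =====
-- stated objective: alternative
-- what changed: Replaces six sequential per-section scans by building one name->(object_type,property) dict over the sections in reverse priority order (later inserts overwrite) followed by a single lookup.
import Mathlib
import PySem

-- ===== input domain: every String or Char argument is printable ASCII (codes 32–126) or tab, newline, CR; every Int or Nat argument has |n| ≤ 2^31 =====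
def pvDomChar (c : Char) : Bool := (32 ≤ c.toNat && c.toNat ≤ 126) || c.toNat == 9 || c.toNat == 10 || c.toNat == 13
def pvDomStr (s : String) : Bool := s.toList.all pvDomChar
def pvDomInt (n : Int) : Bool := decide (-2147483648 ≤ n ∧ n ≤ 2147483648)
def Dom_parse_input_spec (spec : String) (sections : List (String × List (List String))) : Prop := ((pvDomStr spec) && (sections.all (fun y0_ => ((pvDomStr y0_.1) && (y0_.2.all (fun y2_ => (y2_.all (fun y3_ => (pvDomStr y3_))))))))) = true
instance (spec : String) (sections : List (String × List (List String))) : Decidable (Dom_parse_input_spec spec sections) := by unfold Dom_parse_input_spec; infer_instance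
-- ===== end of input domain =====

-- B builds one name→(object_type,property) index over the sections in reverse priority order
-- and does a single lookup, instead of A's six sequential scans (objective: alternative).


-- shared encoding of the Python parameter access `sections.get(key, [])` on the assoc-list dict
def pvSecGet (sections : List (String × List (List String))) (key : String) : List (List String) :=
  match sections.find? (fun p => p.1 == key) with
  | some p => p.2
  | none => []

-- ===== PORT A =====
-- one `for line in …: if len(line) >= 1 and line[0] == name: return …` scan (Bool: did it hit)
def pvScanA (name : String) (lines : List (List String)) : Bool :=
  match lines with
  | [] => false
  | line :: rest =>
    if 1 ≤ line.length ∧ PySem.List.pyGet? line 0 = some name then true else pvScanA name rest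

def parse_input_spec (spec : String) (sections : List (String × List (List String))) : List (String × String) :=
  let name := PySem.Str.strip spec
  if pvScanA name (pvSecGet sections "RAINGAGES") then
    [("name", name), ("object_type", "GAGE"), ("property", "RAINFALL")]
  else if pvScanA name (pvSecGet sections "PUMPS") then
    [("name", name), ("object_type", "PUMP"), ("property", "SETTING")]
  else if pvScanA name (pvSecGet sections "ORIFICES") then
    [("name", name), ("object_type", "ORIFICE"), ("property", "SETTING")]
  else if pvScanA name (pvSecGet sections "WEIRS") then
    [("name", name), ("object_type", "WEIR"), ("property", "SETTING")]
  else if pvScanA name (pvSecGet sections "JUNCTIONS") then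
    [("name", name), ("object_type", "NODE"), ("property", "LATFLOW")]
  else if pvScanA name (pvSecGet sections "STORAGE") then
    [("name", name), ("object_type", "NODE"), ("property", "LATFLOW")]
  else []  -- Python raises ValueError here; excluded by Pre_parse_input_spec

-- ===== PORT B =====
def pvMeta : List (String × String × String) :=
  [("STORAGE", "NODE", "LATFLOW"), ("JUNCTIONS", "NODE", "LATFLOW"),
   ("WEIRS", "WEIR", "SETTING"), ("ORIFICES", "ORIFICE", "SETTING"),
   ("PUMPS", "PUMP", "SETTING"), ("RAINGAGES", "GAGE", "RAINFALL")]

-- inner loop: `for line in sections.get(sec, []): if len(line) >= 1: index[line[0]] = (otype, prop)`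
def pvIndexSec (op : String × String) (idx : PySem.Dict String (String × String))
    (lines : List (List String)) : PySem.Dict String (String × String) :=
  lines.foldl (fun idx line =>
    match line with
    | [] => idx
    | h :: _ => idx.insert h op) idx

def pvBuildIndex (sections : List (String × List (List String))) :
    PySem.Dict String (String × String) :=
  pvMeta.foldl (fun idx m => pvIndexSec (m.2.1, m.2.2) idx (pvSecGet sections m.1)) PySem.Dict.empty

def parse_input_spec_alt (spec : String) (sections : List (String × List (List String))) : List (String × String) :=
  let name := PySem.Str.strip spec
  match (pvBuildIndex sections).get? name with
  | some op => [("name", name), ("object_type", op.1), ("property", op.2)]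
  | none => []  -- Python raises ValueError here; excluded by Pre_parse_input_spec

-- ===== PRECONDITION & SPEC =====
def pvHasName (name : String) (lines : List (List String)) : Bool :=
  lines.any (fun l => l.head? == some name)

-- Pre_ excludes exactly the inputs where the stripped name heads no line of the six
-- sections, on which Python A (and B) raise ValueError.
def Pre_parse_input_spec (spec : String) (sections : List (String × List (List String))) : Prop :=
  ∃ sec ∈ ["RAINGAGES", "PUMPS", "ORIFICES", "WEIRS", "JUNCTIONS", "STORAGE"],
    pvHasName (PySem.Str.strip spec) (pvSecGet sections sec) = true

instance (spec : String) (sections : List (String × List (List String))) : Decidable (Pre_parse_input_spec spec sections) := by unfold Pre_parse_input_spec; infer_instance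

def pvWitness_parse_input_spec : String × (List (String × List (List String))) :=
  (" G1 ", [("RAINGAGES", [["G1", "V1"]]), ("JUNCTIONS", [["J1"]])])

def Spec_parse_input_spec (spec : String) (sections : List (String × List (List String))) (out : List (String × String)) : Prop := out = parse_input_spec_alt spec sections
instance (spec : String) (sections : List (String × List (List String))) (out : List (String × String)) : Decidable (Spec_parse_input_spec spec sections out) := by unfold Spec_parse_input_spec; infer_instance

-- ===== CLAIM (what is proved, stated in full; the proofs are below) =====
def Claim_equal_parse_input_spec : Prop := ∀ (spec : String) (sections : List (String × List (List String))), Dom_parse_input_spec spec sections → Pre_parse_input_spec spec sections → Spec_parse_input_spec spec sections (parse_input_spec spec sections)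

-- ===== LEMMAS AND PROOFS =====

theorem pvScanA_eq_hasName (name : String) (lines : List (List String)) :
    pvScanA name lines = pvHasName name lines := by
  induction lines with
  | nil => rfl
  | cons l rest ih =>
    cases l with
    | nil => simpa [pvScanA, pvHasName, PySem.List.pyGet?] using ih
    | cons h t =>
      have hget : PySem.List.pyGet? (h :: t) (0 : Int) = some h := by
        simp [PySem.List.pyGet?, PySem.List.pyIdx?]
      simp only [pvScanA, pvHasName, List.any_cons, List.head?_cons, hget]
      by_cases hh : h = name
      · subst hh; simp
      · have hb : ((some h : Option String) == some name) = false := by simpa using hh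
        simp only [hb, Bool.false_or]
        simpa [hh, pvHasName] using ih

theorem get?_pvIndexSec (op : String × String) (idx : PySem.Dict String (String × String))
    (lines : List (List String)) (name : String) :
    (pvIndexSec op idx lines).get? name =
      if pvHasName name lines then some op else idx.get? name := by
  induction lines generalizing idx with
  | nil => simp [pvIndexSec, pvHasName]
  | cons l rest ih =>
    cases l with
    | nil => simpa [pvIndexSec, pvHasName, List.foldl] using ih idx
    | cons h t =>
      simp only [pvIndexSec, List.foldl] at *
      rw [ih (idx.insert h op)]
      simp only [pvHasName, List.any_cons, List.head?_cons]
      by_cases hr : (rest.any (fun l => l.head? == some name)) = true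
      · simp [hr]
      · simp only [hr, Bool.or_false]
        rw [PySem.Dict.get?_insert]
        by_cases hh : h = name
        · subst hh; simp
        · simp [hh, Ne.symm hh]

theorem parse_input_spec_eq (spec : String) (sections : List (String × List (List String))) :
    Pre_parse_input_spec spec sections →
    parse_input_spec spec sections = parse_input_spec_alt spec sections := by
  intro hpre
  unfold parse_input_spec parse_input_spec_alt pvBuildIndex pvMeta
  simp only [List.foldl, pvScanA_eq_hasName, get?_pvIndexSec, PySem.Dict.get?_empty]
  unfold Pre_parse_input_spec at hpre
  simp only [List.mem_cons, List.not_mem_nil, or_false, exists_eq_or_imp, exists_eq_left] at hpre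
  split_ifs <;> simp_all

-- ===== VERDICT (by name: the statement is the Claim_ definition above) =====
theorem parse_input_spec_spec : Claim_equal_parse_input_spec := by
  intro spec sections _ hpre
  exact parse_input_spec_eq spec sections hpre
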